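-- pv_equiv track=rewrite | github.com/ros-industrial-attic/robodk_postprocessors | Universal_Robots_3D_Printing.py | get_safe_name
-- ===== SOURCE A (Python) =====
-- def get_safe_name(progname):
--     """Get a safe program name"""
--     for c in r'-[]/\;,><&*:%=+@!#^|?^':
--         progname = progname.replace(c,'')
--     if len(progname) <= 0:
--         progname = 'Program'
--     if progname[0].isdigit():
--         progname = 'P' + progname
--     return progname
-- ===== SOURCE B (Python) =====
-- def get_safe_name(progname):
--     """Get a safe program name"""
--     BAD = frozenset(r'-[]/\;,><&*:%=+@!#^|?^')
--     kept = [c for c in progname if c not in BAD]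
--     if not kept:
--         return 'Program'
--     name = ''.join(kept)
--     return 'P' + name if kept[0].isdigit() else name
-- ===== Notes on version B (the rewrite author's own statement) =====
-- stated objective: idiomatic
-- what changed: A scans the string once per forbidden character (23 replace passes, then two mutating guards); B makes one filtering pass over the string with a precomputed set of forbidden characters and returns directly via case analysis on the filtered result (empty -> 'Program', digit-leading -> 'P'+name).
import Mathlib
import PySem

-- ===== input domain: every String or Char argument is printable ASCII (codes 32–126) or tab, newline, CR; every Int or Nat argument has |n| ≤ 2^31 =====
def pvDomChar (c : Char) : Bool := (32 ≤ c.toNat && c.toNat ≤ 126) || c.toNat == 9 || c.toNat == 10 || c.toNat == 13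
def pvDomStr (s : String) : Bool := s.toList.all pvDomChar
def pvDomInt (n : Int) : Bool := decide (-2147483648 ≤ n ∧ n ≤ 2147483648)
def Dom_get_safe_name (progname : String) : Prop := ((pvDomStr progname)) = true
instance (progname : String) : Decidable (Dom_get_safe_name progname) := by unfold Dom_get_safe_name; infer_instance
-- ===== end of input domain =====

-- B replaces A's 23 replace-scans (one per forbidden character) and two mutating guards by one
-- filtering pass with a precomputed set and direct case analysis on the result; same values, not claimed faster.

-- ===== PORT A =====
-- A: loop over the forbidden characters, removing each from the string with replace; then two guards mutating progname.
def pvBadChars : List Char := "-[]/\\;,><&*:%=+@!#^|?^".toList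

def get_safe_name (progname : String) : String :=
  let cs := pvBadChars.foldl (fun s c => PySem.Chars.replace s [c] []) progname.toList
  let cs := if cs.length ≤ 0 then "Program".toList else cs
  match PySem.List.pyGet? cs 0 with
  | some c => if PySem.Chars.isdigit c then String.ofList ('P' :: cs) else String.ofList cs
  | none => String.ofList cs

-- ===== PORT B =====
-- B: one filtering pass with a precomputed set of forbidden characters, then case analysis with early returns.
def pvBadSet : PySem.Set Char := PySem.Set.ofList "-[]/\\;,><&*:%=+@!#^|?^".toList

def get_safe_name_alt (progname : String) : String :=
  match progname.toList.filter (fun c => !(pvBadSet.contains c)) with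
  | [] => "Program"
  | c :: rest =>
    let name := String.ofList (c :: rest)
    if PySem.Chars.isdigit c then "P" ++ name else name

-- ===== PRECONDITION & SPEC =====
def Spec_get_safe_name (progname : String) (out : String) : Prop := out = get_safe_name_alt progname
instance (progname : String) (out : String) : Decidable (Spec_get_safe_name progname out) := by unfold Spec_get_safe_name; infer_instance

-- ===== CLAIM (what is proved, stated in full; the proofs are below) =====
def Claim_equal_get_safe_name : Prop := ∀ (progname : String), Dom_get_safe_name progname → Spec_get_safe_name progname (get_safe_name progname)

-- ===== LEMMAS AND PROOFS =====

theorem pv_go_single (b : Char) : ∀ (l : List Char) (fuel : Nat) (acc : List Char),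
    l.length ≤ fuel →
    PySem.Chars.replace.go [b] [] fuel l acc = acc.reverse ++ l.filter (· != b) := by
  intro l
  induction l with
  | nil =>
    intro fuel acc _
    cases fuel <;> simp [PySem.Chars.replace.go]
  | cons c t ih =>
    intro fuel acc h
    cases fuel with
    | zero => simp at h
    | succ n =>
      by_cases hc : b = c
      · subst hc
        have : [b].isPrefixOf (b :: t) = true := by simp [List.isPrefixOf]
        simp only [PySem.Chars.replace.go, this, if_true, List.length_cons,
          List.drop_succ_cons, List.length_nil, List.drop_zero, List.reverse_nil,
          List.nil_append]
        rw [ih n acc (by simpa using h)]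
        simp
      · have : [b].isPrefixOf (c :: t) = false := by
          simp [List.isPrefixOf]; exact fun hbc => hc hbc
        simp only [PySem.Chars.replace.go, this]
        rw [ih n (c :: acc) (by simpa using h)]
        simp [Ne.symm hc]

theorem pv_replace_single (b : Char) (s : List Char) :
    PySem.Chars.replace s [b] [] = s.filter (· != b) := by
  have : ([b] : List Char).isEmpty = false := by simp
  simp only [PySem.Chars.replace, this]
  exact pv_go_single b s s.length [] le_rfl

theorem pv_foldl_replace (bad : List Char) : ∀ (s : List Char),
    bad.foldl (fun s c => PySem.Chars.replace s [c] []) s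
      = s.filter (fun ch => !(bad.contains ch)) := by
  induction bad with
  | nil => intro s; simp
  | cons c rest ih =>
    intro s
    rw [List.foldl_cons, pv_replace_single, ih, List.filter_filter]
    apply List.filter_congr
    intro x _
    by_cases hx : x = c <;> simp [hx]

theorem pv_clean_eq (s : List Char) :
    pvBadChars.foldl (fun s c => PySem.Chars.replace s [c] []) s
      = s.filter (fun c => !(pvBadSet.contains c)) := by
  rw [pv_foldl_replace]
  apply List.filter_congr
  intro x _
  have h : pvBadSet.contains x = pvBadChars.contains x := by
    simp [pvBadSet, pvBadChars, PySem.Set.mem_ofList]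
  rw [h]

theorem pv_ofList_P (l : List Char) :
    String.ofList ('P' :: l) = "P" ++ String.ofList l := by
  apply String.toList_injective
  simp [String.toList_append]

-- ===== VERDICT (by name: the statement is the Claim_ definition above) =====
theorem get_safe_name_spec : Claim_equal_get_safe_name := by
  intro progname _
  unfold Spec_get_safe_name get_safe_name get_safe_name_alt
  rw [pv_clean_eq]
  cases h : progname.toList.filter (fun c => !(pvBadSet.contains c)) with
  | nil => decide
  | cons c rest =>
    simp only [List.length_cons, Nat.le_zero, Nat.succ_ne_zero, if_false]
    have : PySem.List.pyGet? (c :: rest) 0 = some c := by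
      simp [PySem.List.pyGet?, PySem.List.pyIdx?]
    rw [this]
    by_cases hd : PySem.Chars.isdigit c
    · simp only [hd, if_true]
      exact pv_ofList_P (c :: rest)
    · simp [hd]
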